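-- pv_equiv track=rewrite | github.com/Byeong-soo/Algorithm | 프로그래머스/level_2/할인행사.py | solution
-- ===== SOURCE A (Python) =====
-- import collections
--
-- def check(dic):
--     for val in dic.values():
--         if val > 0:
--             return False
--     return True
--
-- def solution(want, number, discount):
--     answer = 0
--     discount_count = {}
--     for i in range(len(want)):
--         discount_count[want[i]] = number[i]
--     discount_list = collections.deque([])
--
--     for i in range(len(discount) - 1, len(discount) - 11, -1):
--         try:
--             discount_list.append(discount[i])
--             discount_count[discount[i]] -= 1
--         except Exception:
--             continue
--
--     if check(discount_count):
--         answer += 1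
--
--     rest_discount = discount[:-10]
--
--     while rest_discount:
--         try:
--             out_item = discount_list.popleft()
--             discount_count[out_item] += 1
--         except Exception:
--             pass
--
--         try:
--             in_item = rest_discount.pop()
--             discount_list.append(in_item)
--             discount_count[in_item] -= 1
--         except Exception:
--             pass
--
--         if check(discount_count):
--             answer += 1
--
--     return answer
-- ===== SOURCE B (Python) =====
-- import collections
--
-- def solution(want, number, discount):
--     need = {}
--     for i in range(len(want)):
--         need[want[i]] = number[i]
--     answer = 0
--     for j in range(len(discount) - 9):
--         counts = collections.Counter(discount[j:j + 10])
--         if all(counts[k] >= v for k, v in need.items()):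
--             answer += 1
--     return answer
-- ===== Notes on version B (the rewrite author's own statement) =====
-- stated objective: simpler
-- what changed: A maintains an incremental counter dict plus a deque and slides the window right-to-left with try/except bookkeeping; B simply iterates window starts left-to-right and recounts each fixed 10-item slice (collections.Counter) against the wanted amounts.
-- intended difference: When discount has fewer than 10 entries, A's negative-index wraparound fills its window with trailing items counted twice and returns 1 whenever those doubled counts cover the requirements (e.g. 1 when want is empty); B returns 0, the intended number of 10-day windows, since none exists. — e.g. on solution(["a"], [0], ["b"]): A returns 1, B returns 0
import Mathlib
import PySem

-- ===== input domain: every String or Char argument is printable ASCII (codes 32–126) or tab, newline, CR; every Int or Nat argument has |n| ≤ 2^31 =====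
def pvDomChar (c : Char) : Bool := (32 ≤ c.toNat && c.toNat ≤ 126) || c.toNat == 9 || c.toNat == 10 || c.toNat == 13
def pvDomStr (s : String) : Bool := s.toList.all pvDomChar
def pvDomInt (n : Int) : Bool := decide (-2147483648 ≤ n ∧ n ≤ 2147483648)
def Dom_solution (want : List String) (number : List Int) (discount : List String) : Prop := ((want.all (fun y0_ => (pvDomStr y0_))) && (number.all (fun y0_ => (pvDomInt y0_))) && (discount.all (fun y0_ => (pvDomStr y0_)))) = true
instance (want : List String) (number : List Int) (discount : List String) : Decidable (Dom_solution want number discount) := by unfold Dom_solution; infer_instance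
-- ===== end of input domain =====

-- B replaces A's incremental deque-and-counter window maintenance by a plain recount of every
-- 10-item window (objective: simpler); on discount lists shorter than 10 the two differ (see D_ below).

-- ===== PORT A =====
-- both Python versions build the requirement dict with the identical loop
-- 'for i in range(len(want)): d[want[i]] = number[i]'
def mkNeed (want : List String) (number : List Int) : PySem.Dict String Int :=
  (PySem.List.pyRange 0 (PySem.List.len want) 1).foldl
    (fun d i => d.insert (PySem.List.pyGetD want i "") (PySem.List.pyGetD number i 0)) PySem.Dict.empty

-- 'discount_count[x] -= 1' inside try/except: KeyError leaves the dict unchanged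
def pyDec (d : PySem.Dict String Int) (x : String) : PySem.Dict String Int :=
  if d.contains x then d.modify x 0 (fun v => v - 1) else d

-- 'discount_count[x] += 1' inside try/except
def pyInc (d : PySem.Dict String Int) (x : String) : PySem.Dict String Int :=
  if d.contains x then d.modify x 0 (fun v => v + 1) else d

-- def check(dic): for val in dic.values(): if val > 0: return False / return True
def checkA (d : PySem.Dict String Int) : Bool :=
  d.values.all (fun v => !decide (v > 0))

-- one iteration of A's while loop: popleft (except: pass), pop from rest / append / decrement, check
def whileBody (s : List String × PySem.Dict String Int × Int) (inItem : String) :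
    List String × PySem.Dict String Int × Int :=
  let s' : List String × PySem.Dict String Int :=
    match s.1 with
    | [] => (s.1, s.2.1)
    | o :: t => (t, pyInc s.2.1 o)
  let dl := s'.1 ++ [inItem]
  let dc := pyDec s'.2 inItem
  (dl, dc, s.2.2 + (if checkA dc then (1 : Int) else 0))

def solution (want : List String) (number : List Int) (discount : List String) : Int :=
  let dc0 := mkNeed want number
  let L : Int := PySem.List.len discount
  -- for i in range(len(discount)-1, len(discount)-11, -1): try append / decrement except continue
  let s1 := (PySem.List.pyRange (L - 1) (L - 11) (-1)).foldl
    (fun (s : List String × PySem.Dict String Int) i =>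
      match PySem.List.pyGet? discount i with
      | none => s
      | some x => (s.1 ++ [x], pyDec s.2 x)) (([] : List String), dc0)
  let answer : Int := if checkA s1.2 then 1 else 0
  let rest := PySem.List.slice discount none (some (-10))
  -- while rest_discount: pops from the END of rest, i.e. processes rest.reverse in order
  let s2 := rest.reverse.foldl whileBody (s1.1, s1.2, answer)
  s2.2.2

-- ===== PORT B =====
def solution_alt (want : List String) (number : List Int) (discount : List String) : Int :=
  let need := mkNeed want number
  (PySem.List.pyRange 0 (PySem.List.len discount - 9) 1).foldl
    (fun ans j =>
      let counts := PySem.Dict.counter (PySem.List.slice discount (some j) (some (j + 10)))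
      if need.items.all (fun p => decide (p.2 ≤ counts.getD p.1 0))
      then ans + 1 else ans) 0

-- ===== PRECONDITION & SPEC =====
-- Pre_ excludes only inputs where A raises: want longer than number gives IndexError in the first loop.
def Pre_solution (want : List String) (number : List Int) (discount : List String) : Prop :=
  want.length ≤ number.length
instance (want : List String) (number : List Int) (discount : List String) : Decidable (Pre_solution want number discount) := by unfold Pre_solution; infer_instance

def pvWitness_solution : List String × List Int × List String := (["a"], [1], ["b"])

-- When discount has fewer than 10 entries, A's negative-index wraparound fills its window with trailing
-- items counted twice and returns 1 whenever those doubled counts cover the requirements (e.g. 1 on empty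
-- inputs); B returns 0, the intended number of 10-day windows, since none exists.
def D_solution (want : List String) (number : List Int) (discount : List String) : Prop :=
  discount.length ≤ 9 ∧
  ∀ i < want.length, (want.getD i "") ∉ want.drop (i + 1) →
    number.getD i 0 ≤ (discount.count (want.getD i "") : Int)
      + ((discount.drop (2 * discount.length - 10)).count (want.getD i "") : Int)
instance (want : List String) (number : List Int) (discount : List String) : Decidable (D_solution want number discount) := by unfold D_solution; infer_instance

def Spec_solution (want : List String) (number : List Int) (discount : List String) (out : Int) : Prop := ¬ D_solution want number discount → out = solution_alt want number discount
instance (want : List String) (number : List Int) (discount : List String) (out : Int) : Decidable (Spec_solution want number discount out) := by unfold Spec_solution; infer_instance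

def pvDiffWitness_solution : List String × List Int × List String := (["a"], [0], ["b"])
def pvDiffWitnessOut_solution : Int × Int := (1, 0)

-- ===== CLAIM (what is proved, stated in full; the proofs are below) =====
def Claim_unchanged_solution : Prop := ∀ (want : List String) (number : List Int) (discount : List String), Dom_solution want number discount → Pre_solution want number discount → Spec_solution want number discount (solution want number discount)
def Claim_changed_solution : Prop := Dom_solution (pvDiffWitness_solution.1) (pvDiffWitness_solution.2.1) (pvDiffWitness_solution.2.2) ∧ Pre_solution (pvDiffWitness_solution.1) (pvDiffWitness_solution.2.1) (pvDiffWitness_solution.2.2) ∧ D_solution (pvDiffWitness_solution.1) (pvDiffWitness_solution.2.1) (pvDiffWitness_solution.2.2) ∧ solution (pvDiffWitness_solution.1) (pvDiffWitness_solution.2.1) (pvDiffWitness_solution.2.2) = pvDiffWitnessOut_solution.1 ∧ solution_alt (pvDiffWitness_solution.1) (pvDiffWitness_solution.2.1) (pvDiffWitness_solution.2.2) = pvDiffWitnessOut_solution.2 ∧ pvDiffWitnessOut_solution.1 ≠ pvDiffWitnessOut_solution.2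
def Claim_exact_solution : Prop := ∀ (want : List String) (number : List Int) (discount : List String), Dom_solution want number discount → Pre_solution want number discount → D_solution want number discount → solution want number discount ≠ solution_alt want number discount

-- ===== LEMMAS AND PROOFS =====

-- the window of 10 items starting at j
def win (discount : List String) (j : Nat) : List String := (discount.drop j).take 10

-- the coverage condition on a multiset w of items
abbrev covP (need : PySem.Dict String Int) (w : List String) : Prop :=
  ∀ k ∈ need.keys, need.getD k 0 ≤ (w.count k : Int)

-- the counter dict d represents "need minus the counts of m"
def RepW (need d : PySem.Dict String Int) (m : List String) : Prop :=
  d.keys = need.keys ∧ ∀ k ∈ need.keys, d.getD k 0 = need.getD k 0 - (m.count k : Int)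

-- the 0/1 contribution of window j
def ind (need : PySem.Dict String Int) (discount : List String) (j : Nat) : Int :=
  if covP need (win discount j) then 1 else 0

theorem nodup_need (w : List String) (n : List Int) : (mkNeed w n).keys.Nodup := by
  unfold mkNeed
  exact PySem.Dict.nodup_keys_foldl_insert_key _ (fun i => PySem.List.pyGetD w i "")
    (fun d i => PySem.List.pyGetD n i 0) _ PySem.Dict.nodup_keys_empty

theorem covP_reverse (need : PySem.Dict String Int) (w : List String) :
    covP need w.reverse ↔ covP need w := by
  simp [covP, List.count_reverse]

theorem covB (d : PySem.Dict String Int) (hnd : d.keys.Nodup) (w : List String) :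
    (d.items.all (fun p => decide (p.2 ≤ (PySem.Dict.counter w).getD p.1 0)) = true) ↔ covP d w := by
  rw [PySem.Dict.items_eq_map_keys d hnd 0]
  simp [covP, List.all_eq_true, PySem.Dict.getD_counter]

theorem checkA_iff (need d : PySem.Dict String Int) (m : List String)
    (hnd : need.keys.Nodup) (hr : RepW need d m) : (checkA d = true) ↔ covP need m := by
  obtain ⟨hk, hv⟩ := hr
  unfold checkA
  rw [PySem.Dict.values_eq_map_keys d (hk ▸ hnd) 0, hk]
  simp only [List.all_eq_true, List.mem_map]
  constructor
  · intro h k hkm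
    have := h (d.getD k 0) ⟨k, hkm, rfl⟩
    rw [hv k hkm] at this
    simp at this
    omega
  · intro h v ⟨k, hkm, hvk⟩
    subst hvk
    rw [hv k hkm]
    have := h k hkm
    simp
    omega

theorem rep_nil (need : PySem.Dict String Int) : RepW need need [] := by
  exact ⟨rfl, fun k _ => by simp⟩

theorem rep_dec (need d : PySem.Dict String Int) (m : List String) (x : String)
    (h : RepW need d m) : RepW need (pyDec d x) (m ++ [x]) := by
  obtain ⟨hk, hv⟩ := h
  unfold pyDec
  by_cases hc : d.contains x = true
  · rw [if_pos hc]
    refine ⟨?_, ?_⟩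
    · rw [PySem.Dict.keys_modify, PySem.Dict.keys_insert_of_contains _ _ hc, hk]
    · intro k hkm
      rw [PySem.Dict.getD_modify]
      by_cases hkx : k = x
      · subst hkx
        rw [if_pos rfl, hv k hkm]
        simp [List.count_append]
        omega
      · rw [if_neg hkx, hv k hkm]
        have : List.count k [x] = 0 := by simp [List.count_singleton]; exact fun h => hkx h.symm
        simp [List.count_append, this]
  · rw [if_neg hc]
    have hxk : x ∉ need.keys := by
      rw [← hk]; intro hmem
      exact hc ((PySem.Dict.contains_iff_mem_keys d x).mpr hmem)
    refine ⟨hk, ?_⟩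
    intro k hkm
    have hkx : k ≠ x := fun he => hxk (he ▸ hkm)
    have : List.count k [x] = 0 := by simp [List.count_singleton]; exact fun h => hkx h.symm
    rw [hv k hkm]
    simp [List.count_append, this]

theorem rep_inc (need d : PySem.Dict String Int) (t : List String) (o : String)
    (h : RepW need d (o :: t)) : RepW need (pyInc d o) t := by
  obtain ⟨hk, hv⟩ := h
  unfold pyInc
  by_cases hc : d.contains o = true
  · rw [if_pos hc]
    refine ⟨?_, ?_⟩
    · rw [PySem.Dict.keys_modify, PySem.Dict.keys_insert_of_contains _ _ hc, hk]
    · intro k hkm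
      rw [PySem.Dict.getD_modify]
      by_cases hko : k = o
      · subst hko
        rw [if_pos rfl, hv k hkm]
        simp
        omega
      · rw [if_neg hko, hv k hkm]
        have : (o :: t).count k = t.count k := by
          simp [List.count_cons]; exact fun h => hko h.symm
        rw [this]
  · rw [if_neg hc]
    have hok : o ∉ need.keys := by
      rw [← hk]; intro hmem
      exact hc ((PySem.Dict.contains_iff_mem_keys d o).mpr hmem)
    refine ⟨hk, ?_⟩
    intro k hkm
    have hko : k ≠ o := fun he => hok (he ▸ hkm)
    have : (o :: t).count k = t.count k := by
      simp [List.count_cons]; exact fun h => hko h.symm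
    rw [hv k hkm, this]

theorem rep_foldl_dec (need : PySem.Dict String Int) (items : List String) :
    ∀ (d : PySem.Dict String Int) (m : List String), RepW need d m →
    RepW need (items.foldl pyDec d) (m ++ items) := by
  induction items with
  | nil => intro d m h; simpa using h
  | cons x xs ih =>
    intro d m h
    have h1 := rep_dec need d m x h
    have := ih (pyDec d x) (m ++ [x]) h1
    simpa using this

theorem fill_decompose (discount : List String) (idxs : List Int) :
    ∀ (dl : List String) (d : PySem.Dict String Int),
    idxs.foldl (fun (s : List String × PySem.Dict String Int) i =>
      match PySem.List.pyGet? discount i with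
      | none => s
      | some x => (s.1 ++ [x], pyDec s.2 x)) (dl, d)
    = (dl ++ idxs.filterMap (PySem.List.pyGet? discount),
       (idxs.filterMap (PySem.List.pyGet? discount)).foldl pyDec d) := by
  induction idxs with
  | nil => intro dl d; simp
  | cons i is ih =>
    intro dl d
    cases hg : PySem.List.pyGet? discount i with
    | none => simp [List.foldl_cons, hg, ih]
    | some x => simp [List.foldl_cons, hg, ih]

theorem dropmap {α : Type} (xs : List α) (d : α) (t m : Nat) (h : t + m = xs.length) :
    (List.range m).map (fun k => xs.getD (t + k) d) = xs.drop t := by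
  apply List.ext_getElem
  · simp; omega
  · intro i h1 h2
    have h1' : i < m := by simpa using h1
    simp only [List.getElem_map, List.getElem_range, List.getElem_drop]
    rw [List.getD_eq_getElem _ _ (by omega)]

theorem fmap_valid {α : Type} (xs : List α) (l : List Int) (d : α)
    (h : ∀ j ∈ l, PySem.List.pyGet? xs j = some (PySem.List.pyGetD xs j d)) :
    List.filterMap (PySem.List.pyGet? xs) l = l.map (fun j => PySem.List.pyGetD xs j d) := by
  induction l with
  | nil => simp
  | cons j js ih =>
    simp only [List.filterMap_cons, List.map_cons, h j (by simp)]
    rw [ih (fun j hj => h j (by simp [hj]))]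

theorem fmr {α : Type} (xs : List α) (a : Int) (h0 : 0 ≤ a) (ha : a ≤ (xs.length : Int)) :
    List.filterMap (PySem.List.pyGet? xs) (PySem.List.pyRange a (xs.length : Int) 1) = xs.drop a.toNat := by
  cases xs with
  | nil =>
    have : a = 0 := by simp at ha; omega
    subst this
    simp
  | cons y ys =>
    have hv : ∀ j ∈ PySem.List.pyRange a ((y :: ys).length : Int) 1,
        PySem.List.pyGet? (y :: ys) j = some (PySem.List.pyGetD (y :: ys) j y) := by
      intro j hj
      rw [PySem.List.mem_pyRange_one] at hj
      have h0' : 0 ≤ j := le_trans h0 hj.1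
      rw [PySem.List.pyGet?_eq_some_getElem _ h0' hj.2, PySem.List.pyGetD_eq_getElem _ _ h0' hj.2]
    rw [fmap_valid _ _ y hv, PySem.List.map_pyGetD_pyRange' _ y h0]

theorem negfm_core {α : Type} (xs : List α) (a : Int) (hlo : -(xs.length : Int) ≤ a) (ha : a ≤ 0) :
    List.filterMap (PySem.List.pyGet? xs) (PySem.List.pyRange a 0 1)
      = xs.drop ((xs.length : Int) + a).toNat := by
  cases xs with
  | nil =>
    have : a = 0 := by simp at hlo; omega
    subst this
    simp [PySem.List.pyRange_one_eq_nil (by omega : (0:Int) ≤ 0)]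
  | cons y ys =>
    set xs := y :: ys with hxs
    set L : Int := (xs.length : Int) with hL
    have hLpos : 0 < L := by simp [hL, hxs]
    have hget : ∀ j, -L ≤ j → j < 0 →
        PySem.List.pyGet? xs j = some (xs.getD ((L + j).toNat) y) := by
      intro j hj1 hj2
      obtain ⟨k, hk1, hk2, hk3⟩ : ∃ k : Nat, j = -(k : Int) ∧ 0 < k ∧ k ≤ xs.length :=
        ⟨(-j).toNat, by omega, by omega, by omega⟩
      rw [hk1, PySem.List.pyGet?_neg_natCast xs k hk2 hk3]
      rw [List.getElem?_eq_getElem (by omega), List.getD_eq_getElem _ _ (by omega)]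
      congr 2
      omega
    have hv : ∀ j ∈ PySem.List.pyRange a 0 1,
        PySem.List.pyGet? xs j = some (PySem.List.pyGetD xs j y) := by
      intro j hj
      rw [PySem.List.mem_pyRange_one] at hj
      have h1 := hget j (by omega) hj.2
      unfold PySem.List.pyGetD
      rw [h1]
      simp
    rw [fmap_valid xs _ y hv]
    rw [PySem.List.pyRange_one a 0]
    rw [List.map_map]
    simp only [Function.comp_def]
    have hcong : ∀ k ∈ List.range (0 - a).toNat,
        PySem.List.pyGetD xs (a + (k : Int)) y = xs.getD ((L + a).toNat + k) y := by
      intro k hk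
      simp only [List.mem_range] at hk
      have h1 := hget (a + k) (by omega) (by omega)
      unfold PySem.List.pyGetD
      rw [h1]
      simp only [Option.getD_some]
      congr 1
      omega
    rw [List.map_congr_left hcong]
    rw [dropmap xs y ((L + a).toNat) ((0 - a).toNat) (by omega)]

theorem negfm {α : Type} (xs : List α) (a : Int) (ha : a ≤ 0) :
    List.filterMap (PySem.List.pyGet? xs) (PySem.List.pyRange a 0 1)
      = xs.drop ((xs.length : Int) + a).toNat := by
  set L : Int := (xs.length : Int) with hL
  by_cases hbig : a < -L
  · -- indices below -len raise; split off the invalid head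
    rw [PySem.List.pyRange_one_append a (-L) 0 (by omega) (by omega), List.filterMap_append]
    have h1 : List.filterMap (PySem.List.pyGet? xs) (PySem.List.pyRange a (-L) 1) = [] := by
      rw [List.filterMap_eq_nil_iff]
      intro j hj
      rw [PySem.List.mem_pyRange_one] at hj
      rw [PySem.List.pyGet?_eq_none_iff]
      unfold PySem.Raise.InRange
      omega
    rw [h1, List.nil_append]
    have h2 := negfm_core xs (-L) (by omega) (by omega)
    rw [h2]
    congr 1
    omega
  · exact negfm_core xs a (by omega) ha


theorem while_loop (need : PySem.Dict String Int) (discount : List String)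
    (hnd : need.keys.Nodup) :
    ∀ (j : Nat), j + 10 ≤ discount.length →
    ∀ (d : PySem.Dict String Int) (ans : Int), RepW need d ((win discount j).reverse) →
    (((discount.take j).reverse).foldl whileBody ((win discount j).reverse, d, ans)).2.2
      = ans + ∑ i ∈ Finset.range j, ind need discount i := by
  intro j
  induction j with
  | zero => intro hj d ans hrep; simp
  | succ j ih =>
    intro hj d ans hrep
    have hlt : j < discount.length := by omega
    have hlt10 : j + 10 < discount.length := by omega
    -- the last element of rest is discount[j]
    rw [List.take_add_one, List.getElem?_eq_getElem hlt]
    simp only [Option.toList_some, List.reverse_append, List.reverse_cons, List.reverse_nil,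
      List.nil_append, List.cons_append, List.foldl_cons]
    -- decompose the window at j+1
    have hwin1 : (win discount (j + 1)).reverse
        = discount[j + 10] :: ((discount.drop (j + 1)).take 9).reverse := by
      unfold win
      have h := List.take_add_one (l := discount.drop (j + 1)) (i := 9)
      rw [List.getElem?_drop] at h
      rw [List.getElem?_eq_getElem (by omega : j + 1 + 9 < discount.length)] at h
      simp only [show j + 1 + 9 = j + 10 from by omega, Option.toList_some] at h
      rw [show ((discount.drop (j + 1)).take 10 : List String)
            = (discount.drop (j + 1)).take 9 ++ [discount[j + 10]] from h]
      simp
    have hwin0 : (win discount j).reverse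
        = ((discount.drop (j + 1)).take 9).reverse ++ [discount[j]] := by
      unfold win
      rw [List.drop_eq_getElem_cons hlt]
      rw [show (List.take 10 (discount[j] :: List.drop (j + 1) discount) : List String)
            = discount[j] :: List.take 9 (List.drop (j + 1) discount) from rfl]
      simp
    rw [hwin1] at hrep ⊢
    have hstep : whileBody
        (discount[j + 10] :: ((discount.drop (j + 1)).take 9).reverse, d, ans) discount[j]
        = (((discount.drop (j + 1)).take 9).reverse ++ [discount[j]],
           pyDec (pyInc d discount[j + 10]) discount[j],
           ans + (if checkA (pyDec (pyInc d discount[j + 10]) discount[j]) then (1 : Int) else 0)) := by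
      rfl
    rw [hstep]
    have hrep' : RepW need (pyDec (pyInc d discount[j + 10]) discount[j])
        ((win discount j).reverse) := by
      rw [hwin0]
      exact rep_dec need _ _ _ (rep_inc need d _ _ hrep)
    rw [← hwin0] at hstep ⊢
    have := ih (by omega) (pyDec (pyInc d discount[j + 10]) discount[j])
      (ans + (if checkA (pyDec (pyInc d discount[j + 10]) discount[j]) then (1 : Int) else 0)) hrep'
    rw [this]
    have hind : (if checkA (pyDec (pyInc d discount[j + 10]) discount[j]) then (1 : Int) else 0)
        = ind need discount j := by
      have hiff := checkA_iff need _ _ hnd hrep'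
      rw [covP_reverse] at hiff
      unfold ind
      by_cases hc : covP need (win discount j)
      · rw [if_pos (hiff.mpr hc), if_pos hc]
      · rw [if_neg (fun ht => hc (hiff.mp ht)), if_neg hc]
    rw [hind, Finset.sum_range_succ]
    ring

theorem b_loop (f : Int → Bool) : ∀ (n : Nat) (a : Int),
    (PySem.List.pyRange 0 (n : Int) 1).foldl (fun ans j => if f j then ans + 1 else ans) a
      = a + ∑ i ∈ Finset.range n, (if f (i : Int) then (1 : Int) else 0) := by
  intro n
  induction n with
  | zero => intro a; simp [PySem.List.pyRange_one_eq_nil (le_refl (0 : Int))]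
  | succ n ih =>
    intro a
    have hc : ((n + 1 : Nat) : Int) = (n : Int) + 1 := by push_cast; ring
    rw [hc, PySem.List.pyRange_one_succ_right (by positivity), List.foldl_append, ih a]
    simp only [List.foldl_cons, List.foldl_nil, Finset.sum_range_succ]
    by_cases hf : f (n : Int) = true
    · rw [hf]; simp; ring
    · simp only [Bool.not_eq_true] at hf; rw [hf]; simp

-- the requirement dict as a fold over List.range
def rangeFold (w : List String) (n : List Int) : PySem.Dict String Int :=
  (List.range w.length).foldl (fun d i => d.insert (w.getD i "") (n.getD i 0)) PySem.Dict.empty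

theorem mkNeed_eq (w : List String) (n : List Int) : mkNeed w n = rangeFold w n := by
  unfold mkNeed rangeFold
  rw [PySem.List.len_eq, PySem.List.pyRange_zero_nat w.length, List.foldl_map]
  simp

theorem dict_fold_or {β : Type} (l : List β) (key : β → String) (val : β → Int) :
    ∀ (d : PySem.Dict String Int) (k : String),
    (l.foldl (fun d b => d.insert (key b) (val b)) d).get? k
      = ((l.foldl (fun d b => d.insert (key b) (val b)) PySem.Dict.empty).get? k).or (d.get? k) := by
  induction l using List.reverseRecOn with
  | nil => intro d k; simp [PySem.Dict.get?_empty]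
  | append_singleton l b ih =>
    intro d k
    rw [List.foldl_append, List.foldl_append]
    simp only [List.foldl_cons, List.foldl_nil]
    rw [PySem.Dict.get?_insert, PySem.Dict.get?_insert]
    by_cases hk : k = key b
    · simp [hk]
    · simp only [if_neg hk]
      exact ih d k

theorem rangeFold_mem (w : List String) (n : List Int) (k : String) :
    k ∈ (rangeFold w n).keys ↔ k ∈ w := by
  unfold rangeFold
  rw [PySem.Dict.keys_foldl_insert_key (List.range w.length)
    (fun i => w.getD i "") (fun d i => n.getD i 0) PySem.Dict.empty]
  simp only [PySem.Dict.keys_empty, PySem.Set.update_nil_left, PySem.Set.mem_ofList]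
  simp only [List.mem_map, List.mem_range]
  constructor
  · rintro ⟨i, hi, rfl⟩
    rw [List.getD_eq_getElem _ _ hi]
    exact List.getElem_mem hi
  · intro hk
    obtain ⟨i, hi, hv⟩ := List.mem_iff_getElem.mp hk
    exact ⟨i, hi, by rw [List.getD_eq_getElem _ _ hi, hv]⟩

theorem rangeFold_cons (x : String) (w : List String) (y : Int) (n : List Int) :
    rangeFold (x :: w) (y :: n)
      = (List.range w.length).foldl (fun d i => d.insert (w.getD i "") (n.getD i 0))
          (PySem.Dict.empty.insert x y) := by
  unfold rangeFold
  rw [show (x :: w).length = w.length + 1 from rfl, List.range_succ_eq_map, List.foldl_cons,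
    List.foldl_map]
  simp

theorem rangeFold_get? : ∀ (w : List String) (n : List Int), w.length ≤ n.length →
    ∀ (k : String) (v : Int),
    (rangeFold w n).get? k = some v ↔
      ∃ i < w.length, w.getD i "" = k ∧ k ∉ w.drop (i + 1) ∧ n.getD i 0 = v := by
  intro w
  induction w with
  | nil =>
    intro n h k v
    unfold rangeFold
    simp [PySem.Dict.get?_empty]
  | cons x w ih =>
    intro n h k v
    cases n with
    | nil => simp at h
    | cons y n =>
      have hlen : w.length ≤ n.length := by simp at h; omega
      rw [rangeFold_cons]
      rw [dict_fold_or (List.range w.length) (fun i => w.getD i "") (fun i => n.getD i 0)]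
      have hins : (PySem.Dict.empty.insert x y).get? k
          = if k = x then some y else none := by
        rw [PySem.Dict.get?_insert]
        simp [PySem.Dict.get?_empty]
      rw [hins]
      have hR : (List.foldl (fun d b => d.insert (w.getD b "") (n.getD b 0))
          PySem.Dict.empty (List.range w.length)) = rangeFold w n := rfl
      rw [hR]
      by_cases hk : k ∈ w
      · -- the recursive dict answers; last occurrence of k is inside w
        have hnn : (rangeFold w n).get? k ≠ none := by
          intro hg0
          exact ((PySem.Dict.get?_eq_none_iff_not_mem_keys _ _).mp hg0)
            ((rangeFold_mem w n k).mpr hk)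
        cases hg : (rangeFold w n).get? k with
        | none => exact absurd hg hnn
        | some v' =>
          simp only [Option.some_or]
          rw [ih n hlen k v' ] at hg
          constructor
          · intro hv
            injection hv with hv
            subst hv
            obtain ⟨i, hi, h1, h2, h3⟩ := hg
            refine ⟨i + 1, by simp; omega, ?_, ?_, ?_⟩
            · rw [List.getD_cons_succ]; exact h1
            · simpa using h2
            · rw [List.getD_cons_succ]; exact h3
          · rintro ⟨i, hi, h1, h2, h3⟩
            cases i with
            | zero => exact absurd hk (by simpa using h2)
            | succ i =>
              obtain ⟨i', hi', h1', h2', h3'⟩ := hg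
              have hi2 : i < w.length := by simp at hi; omega
              rw [List.getD_cons_succ] at h1 h3
              rw [List.drop_succ_cons] at h2
              -- both i and i' are the unique last occurrence of k in w
              have : i = i' := by
                by_contra hne
                rcases Nat.lt_or_ge i i' with hlt | hge
                · exact h2 (by
                    rw [List.mem_iff_getElem]
                    refine ⟨i' - (i + 1), by rw [List.length_drop]; omega, ?_⟩
                    rw [List.getElem_drop]
                    rw [← List.getD_eq_getElem _ "" (by omega)]
                    rw [show i + 1 + (i' - (i + 1)) = i' from by omega]
                    exact h1')
                · have hlt' : i' < i := by omega
                  exact h2' (by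
                    rw [List.mem_iff_getElem]
                    refine ⟨i - (i' + 1), by rw [List.length_drop]; omega, ?_⟩
                    rw [List.getElem_drop]
                    rw [← List.getD_eq_getElem _ "" (by omega)]
                    rw [show i' + 1 + (i - (i' + 1)) = i from by omega]
                    exact h1)
              subst this
              rw [h3' ] at h3
              rw [h3]
          
      · -- k not in w: the head insert decides
        have hg : (rangeFold w n).get? k = none := by
          rw [PySem.Dict.get?_eq_none_iff_not_mem_keys, rangeFold_mem]
          exact hk
        rw [hg]
        simp only [Option.none_or]
        constructor
        · intro hv
          by_cases hkx : k = x
          · rw [if_pos hkx] at hv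
            injection hv with hv
            refine ⟨0, by simp, by simpa using hkx.symm, by simpa using hk, by simpa using hv⟩
          · rw [if_neg hkx] at hv
            exact absurd hv (by simp)
        · rintro ⟨i, hi, h1, h2, h3⟩
          cases i with
          | zero =>
            simp only [List.getD_cons_zero] at h1 h3
            rw [if_pos h1.symm]
            rw [h3]
          | succ i =>
            rw [List.getD_cons_succ] at h1
            have hiw : i < w.length := by simp at hi; omega
            have : k ∈ w := by
              rw [← h1, List.getD_eq_getElem _ _ hiw]
              exact List.getElem_mem hiw
            exact absurd this hk

theorem mkNeed_get? (w : List String) (n : List Int) (h : w.length ≤ n.length) (k : String) (v : Int) :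
    (mkNeed w n).get? k = some v ↔
      ∃ i < w.length, w.getD i "" = k ∧ k ∉ w.drop (i + 1) ∧ n.getD i 0 = v := by
  rw [mkNeed_eq]
  exact rangeFold_get? w n h k v

theorem covP_iff_D2 (want : List String) (number : List Int) (h : want.length ≤ number.length)
    (w : List String) :
    covP (mkNeed want number) w ↔
      ∀ i < want.length, (want.getD i "") ∉ want.drop (i + 1) →
        number.getD i 0 ≤ (w.count (want.getD i "") : Int) := by
  constructor
  · intro hc i hi hlast
    have hg : (mkNeed want number).get? (want.getD i "") = some (number.getD i 0) :=
      (mkNeed_get? want number h _ _).mpr ⟨i, hi, rfl, hlast, rfl⟩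
    have hkm : want.getD i "" ∈ (mkNeed want number).keys := by
      by_contra hnm
      rw [← PySem.Dict.get?_eq_none_iff_not_mem_keys] at hnm
      rw [hnm] at hg
      exact absurd hg (by simp)
    have := hc _ hkm
    rwa [PySem.Dict.getD_of_get?_eq_some _ _ hg] at this
  · intro hD k hkm
    have hnn : (mkNeed want number).get? k ≠ none := by
      intro hg0
      exact ((PySem.Dict.get?_eq_none_iff_not_mem_keys _ _).mp hg0) hkm
    cases hg : (mkNeed want number).get? k with
    | none => exact absurd hg hnn
    | some v =>
      obtain ⟨i, hi, h1, h2, h3⟩ := (mkNeed_get? want number h k v).mp hg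
      rw [PySem.Dict.getD_of_get?_eq_some _ _ hg, ← h3, ← h1]
      exact hD i hi (h1 ▸ h2)

-- A's value for at least 10 discount days
theorem solutionA_big (want : List String) (number : List Int) (discount : List String)
    (h10 : 10 ≤ discount.length) :
    solution want number discount
      = ind (mkNeed want number) discount (discount.length - 10)
        + ∑ i ∈ Finset.range (discount.length - 10), ind (mkNeed want number) discount i := by
  set need := mkNeed want number with hneed
  set L : Int := (discount.length : Int) with hL
  have hnd := nodup_need want number
  unfold solution
  dsimp only
  rw [PySem.List.len_eq, ← hL, ← hneed]
  rw [PySem.List.pyRange_neg_one_eq_reverse (L - 1) (L - 11)]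
  rw [show L - 11 + 1 = L - 10 from by ring, show L - 1 + 1 = L from by ring]
  rw [fill_decompose, List.filterMap_reverse]
  have hfm : List.filterMap (PySem.List.pyGet? discount) (PySem.List.pyRange (L - 10) L 1)
      = discount.drop (discount.length - 10) := by
    rw [hL, fmr discount (L - 10) (by omega) (by omega)]
    congr 1
    omega
  have hwinL : (discount.drop (discount.length - 10)) = win discount (discount.length - 10) := by
    unfold win
    rw [List.take_of_length_le (by simp [List.length_drop]; omega)]
  rw [hfm, hwinL]
  have hrep : RepW need ((win discount (discount.length - 10)).reverse.foldl pyDec need)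
      ((win discount (discount.length - 10)).reverse) := by
    have := rep_foldl_dec need ((win discount (discount.length - 10)).reverse) need [] (rep_nil need)
    simpa using this
  have hrest : PySem.List.slice discount none (some (-10)) = discount.take (discount.length - 10) := by
    rw [PySem.List.slice_to_neg_ofNat discount 10 (by omega)]
  rw [hrest]
  have hloop := while_loop need discount hnd (discount.length - 10) (by omega)
    ((win discount (discount.length - 10)).reverse.foldl pyDec need)
    (if checkA ((win discount (discount.length - 10)).reverse.foldl pyDec need) then (1 : Int) else 0)
    hrep
  simp only [List.nil_append] at *
  rw [hloop]
  congr 1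
  have hiff := checkA_iff need _ _ hnd hrep
  rw [covP_reverse] at hiff
  unfold ind
  by_cases hc : covP need (win discount (discount.length - 10))
  · rw [if_pos (hiff.mpr hc), if_pos hc]
  · rw [if_neg (fun ht => hc (hiff.mp ht)), if_neg hc]

theorem solutionB_big (want : List String) (number : List Int) (discount : List String)
    (h10 : 10 ≤ discount.length) :
    solution_alt want number discount
      = ind (mkNeed want number) discount (discount.length - 10)
        + ∑ i ∈ Finset.range (discount.length - 10), ind (mkNeed want number) discount i := by
  set need := mkNeed want number with hneed
  have hnd := nodup_need want number
  unfold solution_alt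
  dsimp only
  rw [PySem.List.len_eq, ← hneed]
  rw [show ((discount.length : Int) - 9) = ((discount.length - 9 : Nat) : Int) from by omega]
  rw [b_loop _ (discount.length - 9) 0]
  have hpt : ∀ i ∈ Finset.range (discount.length - 9),
      (if need.items.all (fun p => decide (p.2 ≤
          (PySem.Dict.counter (PySem.List.slice discount (some (i : Int)) (some ((i : Int) + 10)))).getD p.1 0))
        then (1 : Int) else 0) = ind need discount i := by
    intro i _
    have hsl : PySem.List.slice discount (some (i : Int)) (some ((i : Int) + 10)) = win discount i := by
      rw [PySem.List.slice_toNat discount (by positivity) (by positivity)]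
      unfold win
      congr 1
      omega
    rw [hsl]
    have hiff := covB need hnd (win discount i)
    unfold ind
    by_cases hc : covP need (win discount i)
    · rw [if_pos (hiff.mpr hc), if_pos hc]
    · rw [if_neg (fun ht => hc (hiff.mp ht)), if_neg hc]
  rw [Finset.sum_congr rfl hpt]
  rw [show discount.length - 9 = (discount.length - 10) + 1 from by omega, Finset.sum_range_succ]
  ring

theorem solutionB_small (want : List String) (number : List Int) (discount : List String)
    (h9 : discount.length ≤ 9) : solution_alt want number discount = 0 := by
  unfold solution_alt
  dsimp only
  rw [PySem.List.len_eq]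
  rw [PySem.List.pyRange_one_eq_nil (by omega : (discount.length : Int) - 9 ≤ 0)]
  rfl

theorem solutionA_small (want : List String) (number : List Int) (discount : List String)
    (h9 : discount.length ≤ 9) :
    solution want number discount
      = if covP (mkNeed want number)
            (discount.drop (2 * discount.length - 10) ++ discount) then 1 else 0 := by
  set need := mkNeed want number with hneed
  set L : Int := (discount.length : Int) with hL
  have hnd := nodup_need want number
  unfold solution
  dsimp only
  rw [PySem.List.len_eq, ← hL, ← hneed]
  rw [PySem.List.pyRange_neg_one_eq_reverse (L - 1) (L - 11)]
  rw [show L - 11 + 1 = L - 10 from by ring, show L - 1 + 1 = L from by ring]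
  rw [fill_decompose, List.filterMap_reverse]
  have hfm : List.filterMap (PySem.List.pyGet? discount) (PySem.List.pyRange (L - 10) L 1)
      = discount.drop (2 * discount.length - 10) ++ discount := by
    rw [PySem.List.pyRange_one_append (L - 10) 0 L (by omega) (by omega), List.filterMap_append]
    rw [negfm discount (L - 10) (by omega)]
    have h2 : List.filterMap (PySem.List.pyGet? discount) (PySem.List.pyRange 0 L 1)
        = discount := by
      rw [hL, fmr discount 0 (by omega) (by omega)]
      simp
    rw [h2]
    rw [show (((discount.length : Int)) + (L - 10)).toNat = 2 * discount.length - 10 from by omega]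
  rw [hfm]
  have hrest : PySem.List.slice discount none (some (-10)) = discount.take (discount.length - 10) := by
    rw [PySem.List.slice_to_neg_ofNat discount 10 (by omega)]
  rw [hrest, show discount.length - 10 = 0 from by omega]
  simp only [List.take_zero, List.reverse_nil, List.foldl_nil]
  have hrep : RepW need
      (((discount.drop (2 * discount.length - 10) ++ discount).reverse).foldl pyDec need)
      ((discount.drop (2 * discount.length - 10) ++ discount).reverse) := by
    have := rep_foldl_dec need ((discount.drop (2 * discount.length - 10) ++ discount).reverse)
      need [] (rep_nil need)
    simpa using this
  have hiff := checkA_iff need _ _ hnd hrep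
  rw [covP_reverse] at hiff
  by_cases hc : covP need (discount.drop (2 * discount.length - 10) ++ discount)
  · rw [if_pos hc]
    rw [if_pos (hiff.mpr hc)]
  · rw [if_neg hc]
    rw [if_neg (fun ht => hc (hiff.mp ht))]

-- ===== VERDICT (by name: the statement is the Claim_ definition above) =====
theorem solution_spec : Claim_unchanged_solution := by
  intro want number discount _ hpre hnd
  by_cases h10 : 10 ≤ discount.length
  · rw [solutionA_big want number discount h10, solutionB_big want number discount h10]
  · have h9 : discount.length ≤ 9 := by omega
    rw [solutionA_small want number discount h9, solutionB_small want number discount h9]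
    rw [if_neg]
    intro hcov
    exact hnd ⟨h9, by
      intro i hi hlast
      have h2 := (covP_iff_D2 want number hpre _).mp hcov i hi hlast
      simp [List.count_append] at h2 ⊢
      omega⟩

theorem solution_changed : Claim_changed_solution := by
  unfold Claim_changed_solution
  exact ⟨by decide, by decide, by decide, by decide, by decide, by decide⟩

theorem solution_tight : Claim_exact_solution := by
  intro want number discount _ hpre hd
  obtain ⟨h9, hd2⟩ := hd
  rw [solutionA_small want number discount h9, solutionB_small want number discount h9]
  have hc : covP (mkNeed want number) (discount.drop (2 * discount.length - 10) ++ discount) := by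
    refine (covP_iff_D2 want number hpre _).mpr ?_
    intro i hi hlast
    have h2 := hd2 i hi hlast
    simp [List.count_append] at h2 ⊢
    omega
  rw [if_pos hc]
  decide
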